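-- pv_equiv track=rewrite | github.com/burdianov/getting-started-with-nlp | ch_03/3.4.py | vectorize
-- ===== SOURCE A (Python) =====
-- def vectorize(input_features: dict, vocabulary: list):
--     output = {}
--     for item_id in input_features.keys():
--         features = input_features.get(item_id)
--         output_vector = []
--         for word in vocabulary:
--             if word in features.keys():
--                 output_vector.append(int(features.get(word)))
--             else:
--                 output_vector.append(0)
--         output[item_id] = output_vector
--     return output
-- ===== SOURCE B (Python) =====
-- def vectorize(input_features: dict, vocabulary: list):
--     index = {}
--     for i, word in enumerate(vocabulary):
--         index.setdefault(word, []).append(i)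
--     output = {}
--     for item_id, features in input_features.items():
--         vector = [0] * len(vocabulary)
--         for word, value in features.items():
--             if word in index:
--                 v = int(value)
--                 for i in index[word]:
--                     vector[i] = v
--         output[item_id] = vector
--     return output
-- ===== Notes on version B (the rewrite author's own statement) =====
-- stated objective: faster
-- what changed: Instead of scanning the whole vocabulary per item with a hash lookup per vocabulary word, B precomputes word->positions once and, per item, fills a zero vector by scattering each feature entry into its vocabulary positions, so per-item work is a zero-fill plus one lookup per feature entry.
import Mathlib
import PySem

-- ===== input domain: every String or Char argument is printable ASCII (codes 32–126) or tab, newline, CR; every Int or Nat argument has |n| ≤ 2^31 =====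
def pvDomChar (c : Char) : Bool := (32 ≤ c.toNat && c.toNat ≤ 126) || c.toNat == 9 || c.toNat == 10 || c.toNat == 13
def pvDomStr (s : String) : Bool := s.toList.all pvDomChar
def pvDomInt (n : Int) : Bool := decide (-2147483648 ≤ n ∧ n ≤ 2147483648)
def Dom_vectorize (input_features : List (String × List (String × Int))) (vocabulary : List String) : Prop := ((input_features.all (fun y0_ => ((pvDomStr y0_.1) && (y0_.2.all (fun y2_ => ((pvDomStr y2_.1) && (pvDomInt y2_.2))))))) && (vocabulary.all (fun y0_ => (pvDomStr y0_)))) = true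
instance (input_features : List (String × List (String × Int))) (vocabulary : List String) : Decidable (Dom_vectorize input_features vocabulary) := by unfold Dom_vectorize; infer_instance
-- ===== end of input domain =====

-- B replaces A's per-item scan of the whole vocabulary (one dict lookup per vocabulary word) by a
-- precomputed word→positions index and a per-item scatter of the feature entries into a zero vector
-- (measurably faster in a timing run's constant-factor mechanism: far fewer hash lookups per item).

-- ===== PORT A =====
-- The dict arguments arrive as association lists; as in Python, they are read as dicts
-- (duplicate keys collapse, later value wins, first position kept): PySem.Dict.ofList.
-- Python's int(features.get(word)) is the identity here since the values are already ints.
def vectorize (input_features : List (String × List (String × Int))) (vocabulary : List String) : List (String × List Int) :=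
  let ifd : PySem.Dict String (List (String × Int)) := PySem.Dict.ofList input_features
  -- output = {}; for item_id in input_features.keys(): …
  (ifd.keys.foldl (fun (output : PySem.Dict String (List Int)) item_id =>
      -- features = input_features.get(item_id)  (present: item_id comes from keys())
      let features : PySem.Dict String Int := PySem.Dict.ofList (ifd.getD item_id [])
      -- output_vector = []; for word in vocabulary: append int(features.get(word)) or 0
      let output_vector := vocabulary.foldl (fun acc word =>
          if features.contains word then acc ++ [features.getD word 0] else acc ++ [0]) []
      output.insert item_id output_vector) PySem.Dict.empty).items

-- ===== PORT B =====
def vectorize_alt (input_features : List (String × List (String × Int))) (vocabulary : List String) : List (String × List Int) :=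
  -- index = {}; for i, word in enumerate(vocabulary): index.setdefault(word, []).append(i)
  -- (setdefault(w, []) followed by .append(i) sets index[w] = index.get(w, []) + [i], i.e. Dict.modify)
  let index : PySem.Dict String (List Int) :=
    (PySem.List.enumerate vocabulary 0).foldl (fun d p => d.modify p.2 [] (· ++ [p.1])) PySem.Dict.empty
  let ifd : PySem.Dict String (List (String × Int)) := PySem.Dict.ofList input_features
  -- output = {}; for item_id, features in input_features.items(): …
  (ifd.items.foldl (fun (output : PySem.Dict String (List Int)) kv =>
      let feats : PySem.Dict String Int := PySem.Dict.ofList kv.2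
      -- vector = [0] * len(vocabulary); for word, value in features.items(): scatter
      let vector := feats.items.foldl (fun vec wv =>
          if index.contains wv.1 then
            -- for i in index[word]: vector[i] = v   (indices from enumerate are ≥ 0, so .toNat is exact)
            (index.getD wv.1 []).foldl (fun vec i => vec.set i.toNat wv.2) vec
          else vec) (List.replicate vocabulary.length 0)
      output.insert kv.1 vector) PySem.Dict.empty).items

-- ===== PRECONDITION & SPEC =====
def Spec_vectorize (input_features : List (String × List (String × Int))) (vocabulary : List String) (out : List (String × List Int)) : Prop := out = vectorize_alt input_features vocabulary
instance (input_features : List (String × List (String × Int))) (vocabulary : List String) (out : List (String × List Int)) : Decidable (Spec_vectorize input_features vocabulary out) := by unfold Spec_vectorize; infer_instance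

-- ===== CLAIM (what is proved, stated in full; the proofs are below) =====
def Claim_equal_vectorize : Prop := ∀ (input_features : List (String × List (String × Int))) (vocabulary : List String), Dom_vectorize input_features vocabulary → Spec_vectorize input_features vocabulary (vectorize input_features vocabulary)

-- ===== LEMMAS AND PROOFS =====

-- index helper + characterizations
def pvIndex (vocab : List String) : PySem.Dict String (List Int) :=
  (PySem.List.enumerate vocab 0).foldl (fun d p => d.modify p.2 [] (· ++ [p.1])) PySem.Dict.empty

def pvIdxsOf (vocab : List String) (w : String) : List Int :=
  ((PySem.List.enumerate vocab 0).filter (fun p => p.2 == w)).map (·.1)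

lemma pvIndex_getD (vocab : List String) (w : String) :
    (pvIndex vocab).getD w [] = pvIdxsOf vocab w := by
  have h : pvIndex vocab
      = ((PySem.List.enumerate vocab 0).map Prod.swap).foldl
          (fun d p => d.modify p.1 [] (· ++ [p.2])) PySem.Dict.empty := by
    rw [List.foldl_map]
    rfl
  rw [h, PySem.Dict.getD_foldl_modify_append]
  simp [pvIdxsOf, List.filter_map, Function.comp_def]

lemma pvIndex_contains (vocab : List String) (w : String) :
    (pvIndex vocab).contains w = decide (w ∈ vocab) := by
  rw [pvIndex, PySem.Dict.contains_eq_decide_mem_keys, PySem.Dict.keys_foldl_modify_key]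
  simp [PySem.Dict.keys_empty, PySem.List.map_snd_enumerate]

lemma mem_pvIdxsOf (vocab : List String) (w : String) (j : Int) :
    j ∈ pvIdxsOf vocab w ↔ ∃ (k : Nat), ∃ (h : k < vocab.length), j = (k : Int) ∧ vocab[k] = w := by
  simp only [pvIdxsOf, List.mem_map, List.mem_filter, PySem.List.mem_enumerate_iff]
  constructor
  · rintro ⟨p, ⟨⟨k, hk, rfl⟩, hw⟩, rfl⟩
    exact ⟨k, hk, by simp, by simpa using hw⟩
  · rintro ⟨k, hk, rfl, hw⟩
    exact ⟨((k : Int), vocab[k]), ⟨⟨k, hk, by simp⟩, by simp [hw]⟩, rfl⟩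

lemma pvScatter_length (l : List Int) (x : Int) (v : List Int) :
    (l.foldl (fun v j => v.set j.toNat x) v).length = v.length := by
  induction l generalizing v with
  | nil => rfl
  | cons j t ih => simp [List.foldl_cons, ih, List.length_set]

lemma pvScatter_get_ne (l : List Int) (x : Int) (v : List Int) (i : Nat)
    (h : ∀ j ∈ l, j.toNat ≠ i) :
    (l.foldl (fun v j => v.set j.toNat x) v)[i]? = v[i]? := by
  induction l generalizing v with
  | nil => rfl
  | cons j t ih =>
    rw [List.foldl_cons, ih _ (fun j hj => h j (List.mem_cons_of_mem _ hj))]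
    exact List.getElem?_set_ne (h j (List.mem_cons_self) )

lemma pvScatter_get_hit (l : List Int) (x : Int) (v : List Int) (i : Nat)
    (h : ∃ j ∈ l, j.toNat = i) (hi : i < v.length) :
    (l.foldl (fun v j => v.set j.toNat x) v)[i]? = some x := by
  induction l using List.reverseRecOn generalizing v with
  | nil => simp at h
  | append_singleton t j ih =>
    rw [List.foldl_append, List.foldl_cons, List.foldl_nil]
    by_cases hj : j.toNat = i
    · subst hj
      rw [List.getElem?_set_self]
      rw [pvScatter_length]; exact hi
    · have h' : ∃ j' ∈ t, j'.toNat = i := by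
        rcases h with ⟨j', hj', hji⟩
        rcases List.mem_append.1 hj' with h1 | h1
        · exact ⟨j', h1, hji⟩
        · simp at h1; subst h1; exact absurd hji hj
      rw [List.getElem?_set_ne hj, ih _ h' hi]

def pvStep (vocab : List String) (vec : List Int) (wv : String × Int) : List Int :=
  if (pvIndex vocab).contains wv.1 then
    ((pvIndex vocab).getD wv.1 []).foldl (fun vec i => vec.set i.toNat wv.2) vec
  else vec

-- any scatter step leaves a position whose vocabulary word differs from the step's key unchanged
lemma pvStep_get_ne (vocab : List String) (vec : List Int) (wv : String × Int)
    (i : Nat) (hi : i < vocab.length) (hne : vocab[i] ≠ wv.1) :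
    (pvStep vocab vec wv)[i]? = vec[i]? := by
  unfold pvStep
  split
  · rw [pvIndex_getD]
    apply pvScatter_get_ne
    intro j hj hji
    rcases (mem_pvIdxsOf vocab wv.1 j).1 hj with ⟨k, hk, rfl, hw⟩
    simp at hji
    subst hji
    exact hne hw
  · rfl

lemma pvStep_length (vocab : List String) (vec : List Int) (wv : String × Int) :
    (pvStep vocab vec wv).length = vec.length := by
  unfold pvStep
  split
  · exact pvScatter_length _ _ _
  · rfl

lemma pvFold_length (vocab : List String) (fs : List (String × Int)) (v : List Int) :
    (fs.foldl (pvStep vocab) v).length = v.length := by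
  induction fs generalizing v with
  | nil => rfl
  | cons wv t ih => rw [List.foldl_cons, ih, pvStep_length]

-- a fold over entries none of which carries the word at position i leaves position i unchanged
lemma pvFold_get_of_absent (vocab : List String) (fs : List (String × Int)) (v : List Int)
    (i : Nat) (hi : i < vocab.length) (h : ∀ p ∈ fs, vocab[i] ≠ p.1) :
    (fs.foldl (pvStep vocab) v)[i]? = v[i]? := by
  induction fs generalizing v with
  | nil => rfl
  | cons wv t ih =>
    rw [List.foldl_cons, ih _ (fun p hp => h p (List.mem_cons_of_mem _ hp)),
      pvStep_get_ne vocab v wv i hi (h wv List.mem_cons_self)]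

-- MAIN pointwise lemma: the scatter fold realises first-match lookup at every position
lemma pvFold_get (vocab : List String) (fs : List (String × Int)) (v : List Int)
    (hnd : (fs.map (·.1)).Nodup) (hv : v.length = vocab.length)
    (i : Nat) (hi : i < vocab.length) :
    (fs.foldl (pvStep vocab) v)[i]? =
      match fs.find? (fun p => p.1 == vocab[i]) with
      | some p => some p.2
      | none => v[i]? := by
  induction fs generalizing v with
  | nil => rfl
  | cons wv t ih =>
    rw [List.foldl_cons]
    simp only [List.map_cons, List.nodup_cons] at hnd
    by_cases hw : wv.1 = vocab[i]
    · -- head matches: scatter writes wv.2 at i, the tail never touches i again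
      rw [List.find?_cons_of_pos (by simp [hw])]
      have hstep : (pvStep vocab v wv)[i]? = some wv.2 := by
        unfold pvStep
        rw [if_pos (by rw [pvIndex_contains]; exact decide_eq_true (hw ▸ (List.getElem_mem hi) : wv.1 ∈ vocab))]
        rw [pvIndex_getD]
        apply pvScatter_get_hit
        · exact ⟨(i : Int), (mem_pvIdxsOf vocab wv.1 (i : Int)).2 ⟨i, hi, rfl, hw.symm⟩, Int.toNat_natCast i⟩
        · omega
      rw [pvFold_get_of_absent vocab t _ i hi
        (fun p hp => by
          intro hc
          exact hnd.1 (by rw [hw, hc]; exact List.mem_map_of_mem hp))]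
      exact hstep
    · -- head differs: position i unchanged by the step, recurse
      rw [List.find?_cons_of_neg (by simp [hw])]
      have hs := pvStep_get_ne vocab v wv i hi (fun hc => hw hc.symm)
      rw [ih _ hnd.2 (by rw [pvStep_length]; exact hv)]
      cases hfind : t.find? (fun p => p.1 == vocab[i]) <;> simp [hs]

lemma dict_get?_eq_find? (d : PySem.Dict String Int) (w : String) :
    d.get? w = (d.items.find? (fun p => p.1 == w)).map (·.2) := by
  cases d with
  | mk l =>
    induction l with
    | nil => rfl
    | cons p t ih =>
      rw [PySem.Dict.get?_mk_cons]
      by_cases h : p.1 = w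
      · simp [List.find?_cons_of_pos, h]
      · rw [if_neg (by simpa using h), List.find?_cons_of_neg (by simpa using h)]
        exact ih

-- the per-item vectors agree: B's scatter fold equals A's per-word lookup map
lemma pvVec_eq (vocab : List String) (d : PySem.Dict String Int) (hnd : d.keys.Nodup) :
    d.items.foldl (pvStep vocab) (List.replicate vocab.length 0)
      = vocab.map (fun w => if d.contains w then d.getD w 0 else 0) := by
  apply List.ext_getElem?
  intro i
  by_cases hi : i < vocab.length
  · rw [pvFold_get vocab d.items _ (by simpa only [PySem.Dict.keys] using hnd)
      (List.length_replicate) i hi]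
    rw [List.getElem?_map, List.getElem?_eq_getElem hi]
    have hfind := dict_get?_eq_find? d vocab[i]
    have hc : d.contains vocab[i] = (d.get? vocab[i]).isSome := PySem.Dict.contains_eq_isSome_get? d vocab[i]
    have hg : d.getD vocab[i] 0 = (d.get? vocab[i]).getD 0 := PySem.Dict.getD_eq_get?_getD d vocab[i] 0
    cases hf : d.items.find? (fun p => p.1 == vocab[i]) with
    | none => simp [hc, hfind, hf, hi]
    | some p => simp [hc, hg, hfind, hf]
  · rw [List.getElem?_eq_none, List.getElem?_eq_none]
    · simpa using le_of_not_gt hi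
    · rw [pvFold_length, List.length_replicate]; exact le_of_not_gt hi

-- A's per-word loop is a map
lemma pvVecA_eq (vocab : List String) (d : PySem.Dict String Int) :
    vocab.foldl (fun acc w => if d.contains w then acc ++ [d.getD w 0] else acc ++ [0]) []
      = vocab.map (fun w => if d.contains w then d.getD w 0 else 0) := by
  have h := PySem.List.foldl_congr_mem
    (f := fun acc w => if d.contains w then acc ++ [d.getD w 0] else acc ++ [0])
    (g := fun acc w => acc ++ [if d.contains w then d.getD w 0 else 0])
    (init := ([] : List Int)) (l := vocab)
    (by intro acc w _; by_cases h : d.contains w <;> simp [h])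
  rw [h, PySem.List.foldl_append_singleton_eq_map]
  rfl

def pvGVec (vocab : List String) (fs : List (String × Int)) : List Int :=
  vocab.map (fun w => if (PySem.Dict.ofList fs).contains w then (PySem.Dict.ofList fs).getD w 0 else 0)

lemma vectorize_alt_eq_map (fs : List (String × List (String × Int))) (vocab : List String) :
    vectorize_alt fs vocab = (PySem.Dict.ofList fs).items.map (fun kv => (kv.1, pvGVec vocab kv.2)) := by
  have h : vectorize_alt fs vocab
      = ((PySem.Dict.ofList fs).items.foldl (fun (out : PySem.Dict String (List Int)) kv =>
          out.insert kv.1 ((PySem.Dict.ofList kv.2).items.foldl (pvStep vocab)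
            (List.replicate vocab.length 0))) PySem.Dict.empty).items := rfl
  have hfold := PySem.Dict.items_foldl_insert_fresh ((PySem.Dict.ofList fs).items) (·.1)
    (fun kv => (PySem.Dict.ofList kv.2).items.foldl (pvStep vocab) (List.replicate vocab.length 0))
    PySem.Dict.empty (fun a _ => PySem.Dict.contains_empty _)
    (by simpa only [PySem.Dict.keys] using PySem.Dict.nodup_keys_ofList fs)
  rw [h, hfold]
  simp only [PySem.Dict.empty, List.nil_append]
  apply List.map_congr_left
  intro kv _
  exact congrArg (fun z => (kv.1, z))
    (pvVec_eq vocab (PySem.Dict.ofList kv.2) (PySem.Dict.nodup_keys_ofList kv.2))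

lemma vectorize_eq_map (fs : List (String × List (String × Int))) (vocab : List String) :
    vectorize fs vocab = (PySem.Dict.ofList fs).items.map (fun kv => (kv.1, pvGVec vocab kv.2)) := by
  have h : vectorize fs vocab
      = (((PySem.Dict.ofList fs).items.map (·.1)).foldl (fun (out : PySem.Dict String (List Int)) item_id =>
          out.insert item_id (vocab.foldl (fun acc word =>
            if (PySem.Dict.ofList ((PySem.Dict.ofList fs).getD item_id [])).contains word then
              acc ++ [(PySem.Dict.ofList ((PySem.Dict.ofList fs).getD item_id [])).getD word 0]
            else acc ++ [0]) [])) PySem.Dict.empty).items := rfl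
  have hcongr := PySem.List.foldl_congr_mem ((PySem.Dict.ofList fs).items)
    (fun (out : PySem.Dict String (List Int)) kv =>
      out.insert kv.1 (vocab.foldl (fun acc word =>
        if (PySem.Dict.ofList ((PySem.Dict.ofList fs).getD kv.1 [])).contains word then
          acc ++ [(PySem.Dict.ofList ((PySem.Dict.ofList fs).getD kv.1 [])).getD word 0]
        else acc ++ [0]) []))
    (fun (out : PySem.Dict String (List Int)) kv => out.insert kv.1 (pvGVec vocab kv.2))
    PySem.Dict.empty
    (by
      intro out kv hkv
      obtain ⟨k0, v0⟩ := kv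
      have hget : (PySem.Dict.ofList fs).getD k0 [] = v0 :=
        PySem.Dict.getD_of_mem_items _ hkv (PySem.Dict.nodup_keys_ofList fs) []
      simp only [hget]
      exact congrArg _ (pvVecA_eq vocab (PySem.Dict.ofList v0)))
  have hfold := PySem.Dict.items_foldl_insert_fresh ((PySem.Dict.ofList fs).items) (·.1)
    (fun kv => pvGVec vocab kv.2)
    PySem.Dict.empty (fun a _ => PySem.Dict.contains_empty _)
    (by simpa only [PySem.Dict.keys] using PySem.Dict.nodup_keys_ofList fs)
  rw [h, List.foldl_map, hcongr, hfold]
  simp only [PySem.Dict.empty, List.nil_append]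

-- ===== VERDICT (by name: the statement is the Claim_ definition above) =====
theorem vectorize_spec : Claim_equal_vectorize := by
  intro fs vocab _
  unfold Spec_vectorize
  rw [vectorize_eq_map, vectorize_alt_eq_map]
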